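-- pv_equiv track=rewrite | github.com/GreenBeanGravy/MenuAccess-dev | malib/navigator.py | _sanitize_speech_text
-- ===== SOURCE A (Python) =====
-- def _sanitize_speech_text(text):
--     """
--     Sanitize text for screen reader to avoid issues
--
--     Args:
--         text: Raw text string
--
--     Returns:
--         str: Sanitized text
--     """
--     if not text:
--         return ""
--
--     # Truncate extremely long messages
--     max_length = 200
--     if len(text) > max_length:
--         text = text[:max_length] + "..."
--
--     # Replace potentially problematic characters
--     text = text.replace("\t", " ")
--     text = text.replace("\r", " ")
--     text = text.replace("\n", " ")
--
--     # Collapse multiple spaces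
--     while "  " in text:
--         text = text.replace("  ", " ")
--
--     return text
-- ===== SOURCE B (Python) =====
-- def _sanitize_speech_text(text):
--     """Sanitize text for screen reader: truncate, then collapse whitespace in one pass."""
--     if not text:
--         return ""
--
--     if len(text) > 200:
--         text = text[:200] + "..."
--
--     out = []
--     prev_space = False
--     for c in text:
--         if c in "\t\r\n":
--             c = " "
--         if c == " " and prev_space:
--             continue
--         out.append(c)
--         prev_space = c == " "
--     return "".join(out)
-- ===== Notes on version B (the rewrite author's own statement) =====
-- stated objective: simpler
-- what changed: Replaces the three sequential replace() passes and the quadratic rescan-until-fixpoint while loop with a single character pass that maps tab/CR/LF to space and emits a space only when the previous emitted character was not a space.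
import Mathlib
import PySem

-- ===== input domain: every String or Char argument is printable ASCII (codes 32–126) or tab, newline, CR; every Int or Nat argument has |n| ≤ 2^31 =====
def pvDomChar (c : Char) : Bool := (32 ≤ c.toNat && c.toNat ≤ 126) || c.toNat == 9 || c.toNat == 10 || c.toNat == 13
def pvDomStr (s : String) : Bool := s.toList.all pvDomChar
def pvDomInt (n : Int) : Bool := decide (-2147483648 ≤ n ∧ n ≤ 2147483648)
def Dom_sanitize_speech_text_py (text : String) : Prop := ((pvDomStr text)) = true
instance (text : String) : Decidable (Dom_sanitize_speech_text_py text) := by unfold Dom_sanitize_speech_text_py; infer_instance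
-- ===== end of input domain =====

-- B replaces A's three replace() passes and its rescan-until-fixpoint while loop by one
-- character pass that collapses whitespace as it goes (objective: simpler).

-- ===== PORT A =====
-- A-side helper: what one `text.replace("  ", " ")` returns (Python replaces
-- non-overlapping occurrences left to right); used for the termination measure of the
-- while loop below, and proved equal to PySem.Chars.replace in the lemma section.
def pvRep : List Char → List Char
  | [] => []
  | [c] => [c]
  | c :: d :: t => if c = ' ' ∧ d = ' ' then ' ' :: pvRep t else c :: pvRep (d :: t)
termination_by s => s.length

theorem pvRep_length_le (s : List Char) : (pvRep s).length ≤ s.length := by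
  induction s using pvRep.induct with
  | case1 => simp [pvRep]
  | case2 c => simp [pvRep]
  | case3 c d t h ih => simp only [pvRep, if_pos h, List.length_cons]; omega
  | case4 c d t h ih => simp only [pvRep, if_neg h, List.length_cons] at *; omega

theorem pvRep_length_lt (s : List Char) : [' ', ' '] <:+: s → (pvRep s).length < s.length := by
  induction s using pvRep.induct with
  | case1 => intro h; simp at h
  | case2 c =>
    intro h
    have := h.length_le
    simp at this
  | case3 c d t h ih =>
    intro _
    have := pvRep_length_le t
    simp only [pvRep, if_pos h, List.length_cons]
    omega
  | case4 c d t h ih =>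
    intro hinf
    rcases List.infix_cons_iff.mp hinf with hp | htail
    · rcases List.cons_prefix_cons.mp hp with ⟨hc, hp2⟩
      rcases List.cons_prefix_cons.mp hp2 with ⟨hd, _⟩
      exact absurd ⟨hc.symm, hd.symm⟩ h
    · simp only [pvRep, if_neg h, List.length_cons]
      exact Nat.succ_lt_succ (ih htail)

theorem pvGo_pair (fuel : Nat) : ∀ (l acc : List Char), l.length ≤ fuel →
    PySem.Chars.replace.go [' ', ' '] [' '] fuel l acc = acc.reverse ++ pvRep l := by
  induction fuel with
  | zero =>
    intro l acc h
    have : l = [] := List.eq_nil_of_length_eq_zero (Nat.le_zero.mp h)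
    subst this
    simp [PySem.Chars.replace.go, pvRep]
  | succ n ih =>
    intro l acc h
    match l with
    | [] => simp [PySem.Chars.replace.go, pvRep]
    | [c] =>
      rw [PySem.Chars.replace.go]
      have hpre : ([' ', ' '].isPrefixOf [c]) = false := by
        simp [List.isPrefixOf]
      rw [hpre]
      simp only [Bool.false_eq_true, if_false]
      rw [ih [] (c :: acc) (by simp)]
      simp [pvRep]
    | c :: d :: u =>
      rw [PySem.Chars.replace.go]
      by_cases hcd : c = ' ' ∧ d = ' '
      · obtain ⟨hc, hd⟩ := hcd
        subst hc; subst hd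
        have hpre : ([' ', ' '].isPrefixOf (' ' :: ' ' :: u)) = true := by
          simp [List.isPrefixOf]
        rw [hpre]
        simp only [if_true]
        have hu : u.length ≤ n := by simp at h; omega
        rw [show (' ' :: ' ' :: u).drop [' ', ' '].length = u from rfl]
        rw [ih u ([' '].reverse ++ acc) hu]
        simp [pvRep]
      · have hpre : ([' ', ' '].isPrefixOf (c :: d :: u)) = false := by
          by_cases hc : c = ' '
          · subst hc
            have hd : ¬ d = ' ' := fun hd => hcd ⟨rfl, hd⟩
            simp [List.isPrefixOf, Ne.symm hd]
          · simp [List.isPrefixOf, Ne.symm hc]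
        rw [hpre]
        simp only [Bool.false_eq_true, if_false]
        rw [ih (d :: u) (c :: acc) (by simp at h ⊢; omega)]
        simp [pvRep, if_neg hcd]

theorem pvReplace_eq_rep (s : List Char) :
    PySem.Chars.replace s [' ', ' '] [' '] = pvRep s := by
  rw [PySem.Chars.replace]
  simp only [List.isEmpty_cons, Bool.false_eq_true, if_false]
  simpa using pvGo_pair s.length s [] le_rfl

theorem pvIsIn_iff (s : String) : PySem.Str.isIn "  " s = true ↔ [' ', ' '] <:+: s.toList := by
  constructor
  · intro h
    have := (PySem.Chars.isIn_iff_infix ("  ".toList) s.toList).mp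
      (by simpa [PySem.Str.isIn] using h)
    simpa using this
  · intro h
    have : "  ".toList <:+: s.toList := by simpa using h
    simpa [PySem.Str.isIn] using (PySem.Chars.isIn_iff_infix ("  ".toList) s.toList).mpr this

theorem pvReplaceStr_eq_rep (s : String) :
    (PySem.Str.replace s "  " " ").toList = pvRep s.toList := by
  simp only [PySem.Str.replace, String.toList_ofList]
  rw [show ("  " : String).toList = [' ', ' '] from by decide,
    show (" " : String).toList = [' '] from by decide]
  exact pvReplace_eq_rep s.toList

theorem pvReplace_len_lt (s : String) (h : PySem.Str.isIn "  " s = true) :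
    (PySem.Str.replace s "  " " ").toList.length < s.toList.length := by
  rw [pvReplaceStr_eq_rep]
  exact pvRep_length_lt _ ((pvIsIn_iff s).mp h)

-- while "  " in text: text = text.replace("  ", " ")
def pyCollapseWhile (s : String) : String :=
  if h : PySem.Str.isIn "  " s then pyCollapseWhile (PySem.Str.replace s "  " " ") else s
termination_by s.toList.length
decreasing_by exact pvReplace_len_lt s h

def sanitize_speech_text_py (text : String) : String :=
  if text == "" then ""
  else
    let max_length : Int := 200
    let text1 := if (PySem.Str.len text : Int) > max_length then
        String.ofList (PySem.Chars.slice text.toList none (some max_length) ++ "...".toList)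
      else text
    let text2 := PySem.Str.replace text1 "\t" " "
    let text3 := PySem.Str.replace text2 "\r" " "
    let text4 := PySem.Str.replace text3 "\n" " "
    pyCollapseWhile text4

-- ===== PORT B =====
-- the single pass of Source B: map tab/CR/LF to ' ', skip a space right after an emitted space
def altGo : Bool → List Char → List Char
  | _, [] => []
  | prev, c :: t =>
    let m := if c == '\t' || c == '\r' || c == '\n' then ' ' else c
    if m == ' ' && prev then altGo prev t
    else m :: altGo (m == ' ') t

def sanitize_speech_text_py_alt (text : String) : String :=
  if text == "" then ""
  else
    let cs := text.toList
    let cs1 := if cs.length > 200 then cs.take 200 ++ "...".toList else cs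
    String.ofList (altGo false cs1)

-- ===== PRECONDITION & SPEC =====
def Spec_sanitize_speech_text_py (text : String) (out : String) : Prop := out = sanitize_speech_text_py_alt text
instance (text : String) (out : String) : Decidable (Spec_sanitize_speech_text_py text out) := by unfold Spec_sanitize_speech_text_py; infer_instance

-- ===== CLAIM (what is proved, stated in full; the proofs are below) =====
def Claim_equal_sanitize_speech_text_py : Prop := ∀ (text : String), Dom_sanitize_speech_text_py text → Spec_sanitize_speech_text_py text (sanitize_speech_text_py text)

-- ===== LEMMAS AND PROOFS =====

-- single-character replace is a map
theorem pvGo_single (a b : Char) (fuel : Nat) : ∀ (l acc : List Char), l.length ≤ fuel →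
    PySem.Chars.replace.go [a] [b] fuel l acc
      = acc.reverse ++ l.map (fun c => if c = a then b else c) := by
  induction fuel with
  | zero =>
    intro l acc h
    have : l = [] := List.eq_nil_of_length_eq_zero (Nat.le_zero.mp h)
    subst this
    simp [PySem.Chars.replace.go]
  | succ n ih =>
    intro l acc h
    match l with
    | [] => simp [PySem.Chars.replace.go]
    | c :: t =>
      rw [PySem.Chars.replace.go]
      by_cases hc : c = a
      · subst hc
        have hpre : ([c].isPrefixOf (c :: t)) = true := by simp [List.isPrefixOf]
        rw [hpre]
        simp only [if_true]
        rw [show (c :: t).drop [c].length = t from rfl]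
        rw [ih t ([b].reverse ++ acc) (by simp at h ⊢; omega)]
        simp
      · have hpre : ([a].isPrefixOf (c :: t)) = false := by
          simp [List.isPrefixOf, Ne.symm hc]
        rw [hpre]
        simp only [Bool.false_eq_true, if_false]
        rw [ih t (c :: acc) (by simp at h ⊢; omega)]
        simp [hc]

theorem pvReplace_single (s : String) (a b : Char) :
    (PySem.Str.replace s (String.ofList [a]) (String.ofList [b])).toList
      = s.toList.map (fun c => if c = a then b else c) := by
  simp only [PySem.Str.replace, String.toList_ofList]
  rw [PySem.Chars.replace]
  simp only [List.isEmpty_cons, Bool.false_eq_true, if_false]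
  simpa using pvGo_single a b s.toList.length s.toList [] le_rfl

-- the combined character map of the three replaces / of B's per-char mapping
def pvF (c : Char) : Char := if c == '\t' || c == '\r' || c == '\n' then ' ' else c

theorem pvMap3 (l : List Char) :
    ((l.map (fun c => if c = '\t' then ' ' else c)).map
        (fun c => if c = '\r' then ' ' else c)).map
      (fun c => if c = '\n' then ' ' else c) = l.map pvF := by
  simp only [List.map_map]
  apply List.map_congr_left
  intro c _
  simp only [Function.comp, pvF]
  by_cases h1 : c = '\t' <;> by_cases h2 : c = '\r' <;> by_cases h3 : c = '\n' <;>
    simp_all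

-- canonical collapsed form: every run of spaces becomes one space
def pvCol : List Char → List Char
  | [] => []
  | c :: t => if c = ' ' then ' ' :: pvCol (t.dropWhile (· == ' ')) else c :: pvCol t
termination_by s => s.length
decreasing_by
  · have := List.length_dropWhile_le (· == ' ') t
    simp; omega
  · simp

theorem pvDrop_sp (t : List Char) :
    (' ' :: t).dropWhile (· == ' ') = t.dropWhile (· == ' ') := by
  simp [List.dropWhile]

theorem pvDrop_ns (c : Char) (t : List Char) (hc : ¬ c = ' ') :
    (c :: t).dropWhile (· == ' ') = c :: t := by
  have hb : (c == ' ') = false := by simpa using hc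
  simp [List.dropWhile, hb]

theorem pvCol_sp (t : List Char) :
    pvCol (' ' :: t) = ' ' :: pvCol (t.dropWhile (· == ' ')) := by
  rw [pvCol]; simp

theorem pvCol_ns (c : Char) (t : List Char) (hc : ¬ c = ' ') :
    pvCol (c :: t) = c :: pvCol t := by
  rw [pvCol, if_neg hc]

theorem pvRep_sp2 (t : List Char) : pvRep (' ' :: ' ' :: t) = ' ' :: pvRep t := by
  simp [pvRep]

theorem pvRep_cons2 (c d : Char) (t : List Char) (h : ¬ (c = ' ' ∧ d = ' ')) :
    pvRep (c :: d :: t) = c :: pvRep (d :: t) := by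
  simp only [pvRep]
  rw [if_neg h]

theorem pvRep_cons_ns (d : Char) (t : List Char) (hd : ¬ d = ' ') :
    pvRep (d :: t) = d :: pvRep t := by
  match t with
  | [] => simp [pvRep]
  | e :: u => exact pvRep_cons2 d e u (fun h => hd h.1)

theorem pvCol_rep (n : Nat) : ∀ s : List Char, s.length ≤ n →
    pvCol (pvRep s) = pvCol s ∧
      pvCol ((pvRep s).dropWhile (· == ' ')) = pvCol (s.dropWhile (· == ' ')) := by
  induction n with
  | zero =>
    intro s h
    have : s = [] := List.eq_nil_of_length_eq_zero (Nat.le_zero.mp h)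
    subst this
    simp [pvRep]
  | succ n ih =>
    intro s h
    match s with
    | [] => simp [pvRep]
    | [c] => simp [pvRep]
    | c :: d :: t =>
      simp only [List.length_cons] at h
      by_cases hcd : c = ' ' ∧ d = ' '
      · obtain ⟨hc, hd⟩ := hcd
        subst hc; subst hd
        have iht := ih t (by omega)
        rw [pvRep_sp2]
        constructor
        · rw [pvCol_sp, pvCol_sp, pvDrop_sp, iht.2]
        · rw [pvDrop_sp, pvDrop_sp, pvDrop_sp, iht.2]
      · have ihdt := ih (d :: t) (by simp; omega)
        rw [pvRep_cons2 c d t hcd]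
        by_cases hc : c = ' '
        · subst hc
          have hd : ¬ d = ' ' := fun hd => hcd ⟨rfl, hd⟩
          have hfix : (pvRep (d :: t)).dropWhile (· == ' ') = pvRep (d :: t) := by
            rw [pvRep_cons_ns d t hd, pvDrop_ns d _ hd]
          constructor
          · rw [pvCol_sp, pvCol_sp, hfix, pvDrop_ns d t hd, ihdt.1]
          · rw [pvDrop_sp, pvDrop_sp, hfix, pvDrop_ns d t hd, ihdt.1]
        · constructor
          · rw [pvCol_ns c _ hc, pvCol_ns c _ hc, ihdt.1]
          · rw [pvDrop_ns c _ hc, pvDrop_ns c _ hc, pvCol_ns c _ hc, pvCol_ns c _ hc, ihdt.1]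

theorem pvCol_fixed (n : Nat) : ∀ s : List Char, s.length ≤ n →
    ¬ ([' ', ' '] <:+: s) → pvCol s = s := by
  induction n with
  | zero =>
    intro s hl _
    have : s = [] := List.eq_nil_of_length_eq_zero (Nat.le_zero.mp hl)
    subst this
    simp [pvCol]
  | succ n ih =>
    intro s hl h
    match s with
    | [] => simp [pvCol]
    | c :: t =>
      have hnt : ¬ ([' ', ' '] <:+: t) :=
        fun hinf => h (hinf.trans (List.suffix_cons c t).isInfix)
      have hlt : t.length ≤ n := by simp at hl; omega
      by_cases hc : c = ' '
      · subst hc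
        have hdt : t.dropWhile (· == ' ') = t := by
          match t with
          | [] => simp
          | d :: u =>
            have hd : ¬ d = ' ' := by
              intro hd; subst hd
              exact h ⟨[], u, rfl⟩
            exact pvDrop_ns d u hd
        rw [pvCol_sp, hdt, ih t hlt hnt]
      · rw [pvCol_ns c t hc, ih t hlt hnt]

theorem pvWhile_eq_col (n : Nat) : ∀ s : String, s.toList.length ≤ n →
    pyCollapseWhile s = String.ofList (pvCol s.toList) := by
  induction n with
  | zero =>
    intro s h
    have hs : s.toList = [] := List.eq_nil_of_length_eq_zero (Nat.le_zero.mp h)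
    have hin : ¬ (PySem.Str.isIn "  " s = true) := by
      intro hx
      have := (pvIsIn_iff s).mp hx
      rw [hs] at this
      simp at this
    rw [pyCollapseWhile, dif_neg hin]
    have hsof : String.ofList s.toList = s := by simp
    rw [← hsof, hs]
    simp [pvCol]
  | succ n ih =>
    intro s h
    by_cases hin : PySem.Str.isIn "  " s = true
    · rw [pyCollapseWhile, dif_pos hin]
      have hlt := pvReplace_len_lt s hin
      rw [ih _ (by omega), pvReplaceStr_eq_rep]
      rw [(pvCol_rep s.toList.length s.toList le_rfl).1]
    · rw [pyCollapseWhile, dif_neg hin]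
      have hninf : ¬ ([' ', ' '] <:+: s.toList) := fun hinf => hin ((pvIsIn_iff s).mpr hinf)
      rw [pvCol_fixed s.toList.length s.toList le_rfl hninf]
      simp

-- B's single pass computes pvCol of the mapped list
theorem pvAltGo_eq (s : List Char) :
    altGo false s = pvCol (s.map pvF) ∧
      altGo true s = pvCol ((s.map pvF).dropWhile (· == ' ')) := by
  induction s with
  | nil => simp [altGo, pvCol]
  | cons c t ih =>
    have hm : (if c == '\t' || c == '\r' || c == '\n' then ' ' else c) = pvF c := rfl
    by_cases hsp : pvF c = ' '
    · constructor
      · rw [altGo]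
        simp only [hm, hsp]
        simp only [beq_self_eq_true, Bool.and_false, Bool.false_eq_true, if_false]
        rw [List.map_cons, hsp, pvCol_sp]
        rw [ih.2]
      · rw [altGo]
        simp only [hm, hsp]
        simp only [beq_self_eq_true, Bool.and_true, if_true]
        rw [List.map_cons, hsp, pvDrop_sp]
        exact ih.2
    · have hbeq : (pvF c == ' ') = false := by simpa using hsp
      constructor
      · rw [altGo]
        simp only [hm, hbeq]
        simp only [Bool.false_and, Bool.false_eq_true, if_false]
        rw [List.map_cons, pvCol_ns _ _ hsp, ih.1]
      · rw [altGo]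
        simp only [hm, hbeq]
        simp only [Bool.false_and, Bool.false_eq_true, if_false]
        rw [List.map_cons, pvDrop_ns _ _ hsp, pvCol_ns _ _ hsp, ih.1]

-- ===== VERDICT (by name: the statement is the Claim_ definition above) =====
theorem sanitize_speech_text_py_spec : Claim_equal_sanitize_speech_text_py := by
  intro text hdom
  unfold Spec_sanitize_speech_text_py
  unfold sanitize_speech_text_py sanitize_speech_text_py_alt
  by_cases hempty : text == ""
  · rw [if_pos hempty, if_pos hempty]
  · rw [if_neg hempty, if_neg hempty]
    simp only []
    set cs := text.toList with hcs
    have hlen200 : ((PySem.Str.len text : Int) > (200 : Int)) ↔ cs.length > 200 := by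
      rw [PySem.Str.len_eq]
      exact_mod_cast Iff.rfl
    have htr : (if (PySem.Str.len text : Int) > (200 : Int) then
          String.ofList (PySem.Chars.slice text.toList none (some (200 : Int)) ++ "...".toList)
        else text).toList
        = (if cs.length > 200 then cs.take 200 ++ "...".toList else cs) := by
      by_cases hbig : cs.length > 200
      · rw [if_pos (hlen200.mpr hbig), if_pos hbig]
        rw [String.toList_ofList]
        rw [show PySem.Chars.slice text.toList none (some (200 : Int))
            = PySem.List.slice text.toList none (some (200 : Int)) from rfl]
        rw [PySem.List.slice_to text.toList (by norm_num : (0:Int) ≤ 200)]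
        rfl
      · rw [if_neg (fun hx => hbig (hlen200.mp hx)), if_neg hbig]
    set cs1 := (if cs.length > 200 then cs.take 200 ++ "...".toList else cs) with hcs1
    have h1 : ("\t" : String) = String.ofList ['\t'] := by decide
    have h2 : ("\r" : String) = String.ofList ['\r'] := by decide
    have h3 : ("\n" : String) = String.ofList ['\n'] := by decide
    have hsp : (" " : String) = String.ofList [' '] := by decide
    have hmap : (PySem.Str.replace (PySem.Str.replace (PySem.Str.replace
        (if (PySem.Str.len text : Int) > (200 : Int) then
          String.ofList (PySem.Chars.slice text.toList none (some (200 : Int)) ++ "...".toList)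
        else text) "\t" " ") "\r" " ") "\n" " ").toList = cs1.map pvF := by
      rw [h1, h2, h3, hsp]
      rw [pvReplace_single, pvReplace_single, pvReplace_single]
      rw [htr]
      exact pvMap3 cs1
    rw [pvWhile_eq_col _ _ le_rfl, hmap]
    rw [(pvAltGo_eq cs1).1]
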